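-- pv_equiv track=rewrite | github.com/gilbertwang1981/website-crawler | Convert2Cvs.py | cleanUrls
-- ===== SOURCE A (Python) =====
-- def cleanUrls(urls):
--     url_list = urls.split(', ')
--     cleaned_urls = []
--     for url in url_list:
--         if url.startswith('//'):
--             url = 'https:' + url
--             for suffix in ['.jpg', '.jpeg', '.png', '.gif', '.webp']:
--                 index = url.find(suffix)
--                 if index != -1:
--                     url = url[:index + len(suffix)]
--         cleaned_urls.append(url)
--
--     cleaned_urls_str = ', '.join(cleaned_urls)
--     return cleaned_urls_str
-- ===== SOURCE B (Python) =====
-- _SUFFIXES = ('.jpg', '.jpeg', '.png', '.gif', '.webp')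
--
--
-- def _clean(url):
--     if not url.startswith('//'):
--         return url
--     url = 'https:' + url
--     ends = [url.find(s) + len(s) for s in _SUFFIXES if s in url]
--     return url[:min(ends)] if ends else url
--
--
-- def cleanUrls(urls):
--     return ', '.join(_clean(url) for url in urls.split(', '))
-- ===== Notes on version B (the rewrite author's own statement) =====
-- stated objective: simpler
-- what changed: A repeatedly truncates each protocol-relative url inside an order-dependent loop over the five image suffixes; B computes the first-occurrence end position of each suffix that is present and cuts the url once at the minimum of those ends.
import Mathlib
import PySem

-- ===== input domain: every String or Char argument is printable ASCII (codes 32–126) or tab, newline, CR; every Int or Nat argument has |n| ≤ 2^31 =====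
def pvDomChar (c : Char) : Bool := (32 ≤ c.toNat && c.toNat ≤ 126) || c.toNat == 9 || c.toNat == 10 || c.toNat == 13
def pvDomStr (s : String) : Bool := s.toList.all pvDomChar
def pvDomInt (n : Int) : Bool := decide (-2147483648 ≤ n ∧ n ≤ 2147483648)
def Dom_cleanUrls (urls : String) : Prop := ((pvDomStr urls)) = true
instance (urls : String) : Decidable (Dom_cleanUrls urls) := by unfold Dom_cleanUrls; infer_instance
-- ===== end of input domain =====

-- B replaces A's order-dependent repeated-truncation loop over the five suffixes by computing the
-- end position of each present suffix once and cutting a single time at the minimum (objective: simpler).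

-- the literal suffix list both Pythons carry
def pvSuffixes : List (List Char) :=
  [".jpg".toList, ".jpeg".toList, ".png".toList, ".gif".toList, ".webp".toList]

-- ===== PORT A =====
-- inner loop body: index = url.find(suffix); if index != -1: url = url[:index + len(suffix)]
def cleanAStep (url : List Char) (suffix : List Char) : List Char :=
  let index := PySem.Chars.find url suffix
  if index ≠ -1 then PySem.Chars.slice url none (some (index + (suffix.length : Int))) else url

-- per-url body of A's outer loop
def cleanAUrl (url : List Char) : List Char :=
  if PySem.Chars.startswith url "//".toList then
    List.foldl cleanAStep ("https:".toList ++ url) pvSuffixes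
  else url

def cleanUrls (urls : String) : String :=
  let url_list := PySem.Chars.splitOn urls.toList ", ".toList
  let cleaned_urls := url_list.foldl (fun acc url => acc ++ [cleanAUrl url]) []
  String.ofList (PySem.Chars.join ", ".toList cleaned_urls)

-- ===== PORT B =====
-- per-url: collect end positions of the suffixes that occur, cut once at the minimum
def cleanAltUrl (url : List Char) : List Char :=
  if PySem.Chars.startswith url "//".toList then
    let u := "https:".toList ++ url
    let ends := (pvSuffixes.filter (fun s => PySem.Chars.isIn s u)).map
      (fun s => PySem.Chars.find u s + (s.length : Int))
    match ends.min? with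
    | some m => PySem.Chars.slice u none (some m)
    | none => u
  else url

def cleanUrls_alt (urls : String) : String :=
  String.ofList (PySem.Chars.join ", ".toList
    ((PySem.Chars.splitOn urls.toList ", ".toList).map cleanAltUrl))

-- ===== PRECONDITION & SPEC =====
def Spec_cleanUrls (urls : String) (out : String) : Prop := out = cleanUrls_alt urls
instance (urls : String) (out : String) : Decidable (Spec_cleanUrls urls out) := by unfold Spec_cleanUrls; infer_instance

-- ===== CLAIM (what is proved, stated in full; the proofs are below) =====
def Claim_equal_cleanUrls : Prop := ∀ (urls : String), Dom_cleanUrls urls → Spec_cleanUrls urls (cleanUrls urls)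

-- ===== LEMMAS AND PROOFS =====

-- find points at the first occurrence: the converse direction
theorem find_prefix_unique (cs s : List Char) (k : Nat)
    (h1 : s <+: cs.drop k) (h2 : ∀ i < k, ¬ s <+: cs.drop i) :
    PySem.Chars.find cs s = (k : Int) := by
  have hin : s <:+: cs := h1.isInfix.trans (List.drop_suffix k cs).isInfix
  have hp : 0 ≤ PySem.Chars.find cs s := (PySem.Chars.find_nonneg_iff cs s).mpr hin
  obtain ⟨hpre, hmin⟩ := PySem.Chars.find_spec hp
  have : (PySem.Chars.find cs s).toNat = k := by
    rcases Nat.lt_trichotomy (PySem.Chars.find cs s).toNat k with h | h | h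
    · exact absurd hpre (h2 _ h)
    · exact h
    · exact absurd h1 (hmin _ h)
  omega

-- find inside a prefix cs.take n: the original first occurrence if it fits, else absent
theorem find_take (cs s : List Char) (n : Nat) (hs : s ≠ []) :
    PySem.Chars.find (cs.take n) s =
      if 0 ≤ PySem.Chars.find cs s ∧ (PySem.Chars.find cs s).toNat + s.length ≤ n
      then PySem.Chars.find cs s else -1 := by
  by_cases hp : 0 ≤ PySem.Chars.find cs s
  · obtain ⟨hpre, hmin⟩ := PySem.Chars.find_spec hp
    by_cases hle : (PySem.Chars.find cs s).toNat + s.length ≤ n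
    · rw [if_pos ⟨hp, hle⟩]
      have h1 : s <+: (cs.take n).drop (PySem.Chars.find cs s).toNat := by
        rw [List.drop_take, List.prefix_take_iff]
        exact ⟨hpre, by omega⟩
      have h2 : ∀ i < (PySem.Chars.find cs s).toNat, ¬ s <+: (cs.take n).drop i := by
        intro i hi hcon
        rw [List.drop_take, List.prefix_take_iff] at hcon
        exact hmin i hi hcon.1
      rw [find_prefix_unique (cs.take n) s _ h1 h2]
      omega
    · rw [if_neg (by tauto)]
      rw [PySem.Chars.find_eq_neg_one_iff]
      intro hin
      obtain ⟨j, hj⟩ := (PySem.Chars.exists_prefix_drop_iff_isIn s (cs.take n)).mpr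
        ((PySem.Chars.isIn_iff_infix s (cs.take n)).mpr hin)
      rw [List.drop_take, List.prefix_take_iff] at hj
      have hjge : (PySem.Chars.find cs s).toNat ≤ j := by
        by_contra hlt
        exact hmin j (by omega) hj.1
      have hsne : 0 < s.length := List.length_pos_iff.mpr hs
      have : j ≤ n := by omega
      omega
  · rw [if_neg (by tauto)]
    have hne : PySem.Chars.find cs s = -1 := by
      have := PySem.Chars.neg_one_le_find cs s
      omega
    rw [PySem.Chars.find_eq_neg_one_iff] at hne ⊢
    intro hin
    exact hne (hin.trans (List.take_prefix n cs).isInfix)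

-- the cut A's loop maintains, as a Nat accumulator
def cutStep (cs : List Char) (n : Nat) (s : List Char) : Nat :=
  if 0 ≤ PySem.Chars.find cs s then min n ((PySem.Chars.find cs s).toNat + s.length) else n

-- A's truncation loop, started on a prefix of cs, only shortens the cut
theorem fold_take (cs : List Char) (L : List (List Char)) (hL : ∀ s ∈ L, s ≠ []) :
    ∀ n : Nat, List.foldl cleanAStep (cs.take n) L = cs.take (List.foldl (cutStep cs) n L) := by
  induction L with
  | nil => intro n; rfl
  | cons s L ih =>
    intro n
    have hs : s ≠ [] := hL s (by simp)
    have hstep : cleanAStep (cs.take n) s = cs.take (cutStep cs n s) := by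
      unfold cleanAStep cutStep
      rw [find_take cs s n hs]
      by_cases hc : 0 ≤ PySem.Chars.find cs s ∧ (PySem.Chars.find cs s).toNat + s.length ≤ n
      · rw [if_pos hc]
        have hne : PySem.Chars.find cs s ≠ -1 := by omega
        rw [if_pos hne]
        rw [PySem.Chars.slice_eq_listSlice, PySem.List.slice_to _ (by omega)]
        rw [List.take_take, if_pos hc.1]
        congr 1
        omega
      · rw [if_neg hc]
        rw [if_neg (fun h => h rfl)]
        by_cases hp : 0 ≤ PySem.Chars.find cs s
        · rw [if_pos hp]
          have : min n ((PySem.Chars.find cs s).toNat + s.length) = n := by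
            rcases not_and_or.mp hc with h | h
            · exact absurd hp h
            · omega
          rw [this]
        · rw [if_neg hp]
    rw [List.foldl_cons, hstep, ih (fun t ht => hL t (by simp [ht]))]
    rfl

-- every recorded end is nonnegative and within the string
theorem ends_bounds (u : List Char) (L : List (List Char)) (_hL : ∀ s ∈ L, s ≠ []) :
    ∀ x ∈ (L.filter (fun s => PySem.Chars.isIn s u)).map
        (fun s => PySem.Chars.find u s + (s.length : Int)),
      0 ≤ x ∧ x ≤ u.length := by
  intro x hx
  simp only [List.mem_map, List.mem_filter] at hx
  obtain ⟨s, ⟨hsL, hsin⟩, rfl⟩ := hx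
  have hp : 0 ≤ PySem.Chars.find u s :=
    (PySem.Chars.find_nonneg_iff u s).mpr ((PySem.Chars.isIn_iff_infix s u).mp hsin)
  obtain ⟨hpre, -⟩ := PySem.Chars.find_spec hp
  have hlen : s.length ≤ (u.drop (PySem.Chars.find u s).toNat).length := hpre.length_le
  rw [List.length_drop] at hlen
  have := PySem.Chars.find_le_length u s
  constructor <;> omega

-- B's min-of-ends cut equals A's accumulated cut, for any starting cut n
theorem min_ends_eq (u : List Char) (L : List (List Char)) (hL : ∀ s ∈ L, s ≠ []) :
    ∀ n : Nat,
      (match ((L.filter (fun s => PySem.Chars.isIn s u)).map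
          (fun s => PySem.Chars.find u s + (s.length : Int))).min? with
        | some m => u.take (min n m.toNat)
        | none => u.take n) =
      u.take (List.foldl (cutStep u) n L) := by
  induction L with
  | nil => intro n; rfl
  | cons s L ih =>
    intro n
    have hIH := ih (fun t ht => hL t (by simp [ht]))
    by_cases hsin : PySem.Chars.isIn s u = true
    · have hp : 0 ≤ PySem.Chars.find u s :=
        (PySem.Chars.find_nonneg_iff u s).mpr ((PySem.Chars.isIn_iff_infix s u).mp hsin)
      have hfold : List.foldl (cutStep u) n (s :: L) =
          List.foldl (cutStep u) (min n ((PySem.Chars.find u s).toNat + s.length)) L := by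
        simp only [List.foldl_cons, cutStep, if_pos hp]
      rw [hfold, ← hIH (min n ((PySem.Chars.find u s).toNat + s.length))]
      have hfilter : (s :: L).filter (fun t => PySem.Chars.isIn t u) =
          s :: L.filter (fun t => PySem.Chars.isIn t u) := by
        simp [hsin]
      rw [hfilter, List.map_cons, List.min?_cons]
      cases hm : ((L.filter (fun t => PySem.Chars.isIn t u)).map
          (fun t => PySem.Chars.find u t + (t.length : Int))).min? with
      | none =>
        simp only [Option.elim]
        congr 1
        omega
      | some m =>
        have hm0 : 0 ≤ m :=
          (ends_bounds u L (fun t ht => hL t (by simp [ht])) m (List.min?_mem hm)).1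
        simp only [Option.elim]
        congr 1
        rcases le_total (PySem.Chars.find u s + (s.length : Int)) m with h | h
        · rw [min_eq_left h]; omega
        · rw [min_eq_right h]; omega
    · have hfold : List.foldl (cutStep u) n (s :: L) = List.foldl (cutStep u) n L := by
        have hp : ¬ 0 ≤ PySem.Chars.find u s := by
          rw [PySem.Chars.find_nonneg_iff]
          intro hin
          exact (by simpa [hsin] using (PySem.Chars.isIn_iff_infix s u).mpr hin)
        simp only [List.foldl_cons, cutStep, if_neg hp]
      have hfilter : (s :: L).filter (fun t => PySem.Chars.isIn t u) =
          L.filter (fun t => PySem.Chars.isIn t u) := by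
        simp [hsin]
      rw [hfold, hfilter, hIH n]

theorem pvSuffixes_ne_nil : ∀ s ∈ pvSuffixes, s ≠ [] := by decide

-- the per-url transforms agree
theorem url_eq (url : List Char) : cleanAUrl url = cleanAltUrl url := by
  unfold cleanAUrl cleanAltUrl
  by_cases hsw : PySem.Chars.startswith url "//".toList = true
  · rw [if_pos hsw, if_pos hsw]
    set u := "https:".toList ++ url with hu
    have hA : List.foldl cleanAStep u pvSuffixes =
        u.take (List.foldl (cutStep u) u.length pvSuffixes) := by
      have := fold_take u pvSuffixes pvSuffixes_ne_nil u.length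
      rwa [List.take_length] at this
    rw [hA, ← min_ends_eq u pvSuffixes pvSuffixes_ne_nil u.length]
    cases hm : ((pvSuffixes.filter (fun s => PySem.Chars.isIn s u)).map
        (fun s => PySem.Chars.find u s + (s.length : Int))).min? with
    | none => simp only [hm]; simp [List.take_length]
    | some m =>
      obtain ⟨hm0, hmle⟩ := ends_bounds u pvSuffixes pvSuffixes_ne_nil m
        (List.min?_mem hm)
      simp only [hm]
      rw [PySem.Chars.slice_eq_listSlice, PySem.List.slice_to _ hm0]
      congr 1
      omega
  · rw [if_neg hsw, if_neg hsw]

-- ===== VERDICT (by name: the statement is the Claim_ definition above) =====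
theorem cleanUrls_spec : Claim_equal_cleanUrls := by
  intro urls _
  unfold Spec_cleanUrls
  simp only [cleanUrls, cleanUrls_alt, PySem.List.foldl_append_singleton_eq_map, List.nil_append]
  congr 2
  exact List.map_congr_left fun url _ => url_eq url
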